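-- pv_equiv track=rewrite | github.com/PJYGit/Vegenere-BlockRotate-Playfair | solution_A2.py | blocks_to_baskets
-- ===== SOURCE A (Python) =====
-- def blocks_to_baskets(blocks):
--     # your code here
--     # init the list to store string types
--     empty = ''
--     baskets = [empty] * len(blocks[0])
--
--     for c in range(len(blocks[0])):
--         for element in blocks:
--             if c < len(element):
--                 baskets[c] += element[c]
--
--     return baskets
-- ===== SOURCE B (Python) =====
-- def blocks_to_baskets(blocks):
--     n = len(blocks[0])
--     baskets = []
--     tails = list(blocks)
--     for _ in range(n):
--         baskets.append(''.join(t[0] for t in tails if t))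
--         tails = [t[1:] for t in tails]
--     return baskets
-- ===== Notes on version B (the rewrite author's own statement) =====
-- stated objective: faster
-- what changed: B transposes by repeatedly peeling the first character off every remaining tail and joining the heads once per basket, instead of A's indexed column loop that re-indexes every block per column and grows each basket by repeated string concatenation.
import Mathlib
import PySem

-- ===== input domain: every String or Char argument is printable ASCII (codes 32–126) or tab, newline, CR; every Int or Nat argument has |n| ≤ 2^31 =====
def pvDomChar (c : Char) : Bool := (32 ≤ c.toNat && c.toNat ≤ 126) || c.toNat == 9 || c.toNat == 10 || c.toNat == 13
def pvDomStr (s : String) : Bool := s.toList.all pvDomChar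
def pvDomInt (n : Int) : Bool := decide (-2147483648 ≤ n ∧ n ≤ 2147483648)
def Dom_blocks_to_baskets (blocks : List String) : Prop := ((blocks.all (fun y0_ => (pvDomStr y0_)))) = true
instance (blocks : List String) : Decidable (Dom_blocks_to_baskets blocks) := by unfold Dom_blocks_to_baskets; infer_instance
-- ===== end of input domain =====

-- B replaces A's index-into-every-block column loop by a head-peeling transpose that
-- repeatedly takes the first character of every remaining tail (objective: alternative).

-- ===== PORT A =====
-- A, transliterated: baskets = [''] * len(blocks[0]); for c in range(n): for element in blocks:
-- if c < len(element): baskets[c] += element[c].  Strings are carried as List Char; the final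
-- map String.ofList only packages the accumulated strings.
def blocks_to_baskets (blocks : List String) : List String :=
  match blocks[0]? with
  | none => []   -- Python raises IndexError here; excluded by Pre_
  | some b0 =>
    let n := b0.toList.length
    let baskets : List (List Char) := List.replicate n []
    let final := (List.range n).foldl (fun baskets c =>
        blocks.foldl (fun b element =>
          if c < element.toList.length then
            b.set c (b[c]! ++ [element.toList[c]!])
          else b) baskets) baskets
    final.map String.ofList

-- ===== PORT B =====
-- B, transliterated: n = len(blocks[0]); tails = list(blocks);
-- for _ in range(n): baskets.append(''.join(t[0] for t in tails if t)); tails = [t[1:] for t in tails].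
-- The counted loop is the structural recursion pvPeel on n; ''.join(t[0] for t in tails if t)
-- is filterMap List.head? (exact: t[0] of a nonempty t is its head).
def pvPeel : Nat → List (List Char) → List String
  | 0, _ => []
  | n + 1, tails =>
      String.ofList (tails.filterMap List.head?) :: pvPeel n (tails.map List.tail)

def blocks_to_baskets_alt (blocks : List String) : List String :=
  match blocks[0]? with
  | none => []   -- Python raises IndexError here; excluded by Pre_
  | some b0 => pvPeel b0.toList.length (blocks.map String.toList)

-- ===== PRECONDITION & SPEC =====
-- Pre_ excludes only the empty list, on which Python A raises IndexError at blocks[0].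
def Pre_blocks_to_baskets (blocks : List String) : Prop := blocks ≠ []
instance (blocks : List String) : Decidable (Pre_blocks_to_baskets blocks) := by
  unfold Pre_blocks_to_baskets; infer_instance
def pvWitness_blocks_to_baskets : List String := ["ab", "cde", "x"]

def Spec_blocks_to_baskets (blocks : List String) (out : List String) : Prop := out = blocks_to_baskets_alt blocks
instance (blocks : List String) (out : List String) : Decidable (Spec_blocks_to_baskets blocks out) := by unfold Spec_blocks_to_baskets; infer_instance

-- ===== CLAIM (what is proved, stated in full; the proofs are below) =====
def Claim_equal_blocks_to_baskets : Prop := ∀ (blocks : List String), Dom_blocks_to_baskets blocks → Pre_blocks_to_baskets blocks → Spec_blocks_to_baskets blocks (blocks_to_baskets blocks)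

-- ===== LEMMAS AND PROOFS =====

-- the c-th column: the c-th character of every block long enough to have one, in block order
def pvCol (blocks : List String) (c : Nat) : List Char :=
  blocks.filterMap (fun e => e.toList[c]?)

-- ---- A side ----

def pvInnerA (c : Nat) (blocks : List String) (b : List (List Char)) : List (List Char) :=
  blocks.foldl (fun b element =>
    if c < element.toList.length then
      b.set c (b[c]! ++ [element.toList[c]!])
    else b) b

lemma pvInnerA_cons (c : Nat) (e : String) (rest : List String) (b : List (List Char)) :
    pvInnerA c (e :: rest) b =
      pvInnerA c rest
        (if c < e.toList.length then b.set c (b[c]! ++ [e.toList[c]!]) else b) := rfl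

lemma pvInnerA_length (c : Nat) (blocks : List String) (b : List (List Char)) :
    (pvInnerA c blocks b).length = b.length := by
  induction blocks generalizing b with
  | nil => rfl
  | cons e rest ih =>
      rw [pvInnerA_cons, ih]
      split_ifs <;> simp

lemma pvInnerA_get_at (c : Nat) (blocks : List String) (b : List (List Char))
    (hc : c < b.length) :
    (pvInnerA c blocks b)[c]? = some (b[c]! ++ pvCol blocks c) := by
  induction blocks generalizing b with
  | nil =>
      simp [pvInnerA, pvCol, List.getElem!_eq_getElem?_getD, List.getElem?_eq_getElem hc]
  | cons e rest ih =>
      rw [pvInnerA_cons]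
      by_cases h : c < e.toList.length
      · rw [if_pos h, ih _ (by simpa using hc)]
        have hset : (b.set c (b[c]! ++ [e.toList[c]!]))[c]! = b[c]! ++ [e.toList[c]!] := by
          simp [List.getElem!_eq_getElem?_getD, hc]
        rw [hset]
        simp [pvCol, List.getElem?_eq_getElem h,
          List.getElem!_eq_getElem?_getD, List.append_assoc]
      · rw [if_neg h, ih _ hc]
        have hnone : e.toList[c]? = none := List.getElem?_eq_none (Nat.le_of_not_lt h)
        simp [pvCol, hnone]

def pvOuterA (blocks : List String) (m : Nat) (b : List (List Char)) : List (List Char) :=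
  (List.range m).foldl (fun b c => pvInnerA c blocks b) b

lemma pvInnerA_get_ne (c : Nat) (blocks : List String) (b : List (List Char))
    (j : Nat) (hj : j ≠ c) :
    (pvInnerA c blocks b)[j]? = b[j]? := by
  induction blocks generalizing b with
  | nil => rfl
  | cons e rest ih =>
      rw [pvInnerA_cons]
      split_ifs with h
      · rw [ih, List.getElem?_set_ne (by omega)]
      · exact ih b

lemma pvOuterA_succ (blocks : List String) (m : Nat) (b : List (List Char)) :
    pvOuterA blocks (m + 1) b = pvInnerA m blocks (pvOuterA blocks m b) := by
  simp only [pvOuterA, List.range_succ, List.foldl_append, List.foldl_cons, List.foldl_nil]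

lemma pvOuterA_length (blocks : List String) (m : Nat) (b : List (List Char)) :
    (pvOuterA blocks m b).length = b.length := by
  induction m with
  | zero => rfl
  | succ m ih => rw [pvOuterA_succ, pvInnerA_length, ih]

lemma pvOuterA_get (blocks : List String) (m : Nat) (b : List (List Char)) (j : Nat)
    (hj : j < b.length) :
    (pvOuterA blocks m b)[j]? =
      some (if j < m then b[j]! ++ pvCol blocks j else b[j]!) := by
  induction m with
  | zero =>
      simp [pvOuterA, List.getElem!_eq_getElem?_getD, List.getElem?_eq_getElem hj]
  | succ m ih =>
      rw [pvOuterA_succ]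
      have hlen : j < (pvOuterA blocks m b).length := by rw [pvOuterA_length]; exact hj
      by_cases hjm : j = m
      · subst hjm
        rw [pvInnerA_get_at _ _ _ hlen]
        have h1 : (pvOuterA blocks j b)[j]! = b[j]! := by
          rw [List.getElem!_eq_getElem?_getD, ih]
          simp
        rw [h1]
        simp
      · rw [pvInnerA_get_ne _ _ _ _ hjm, ih]
        by_cases hlt : j < m
        · simp [hlt, Nat.lt_succ_of_lt hlt]
        · have h1 : ¬ j < m + 1 := by omega
          simp [hlt, h1]

-- A's accumulated columns, as an explicit map over the column indices
lemma pvOuterA_eq_map (blocks : List String) (n : Nat) :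
    pvOuterA blocks n (List.replicate n []) = (List.range n).map (pvCol blocks) := by
  apply List.ext_getElem?
  intro j
  by_cases hj : j < n
  · rw [pvOuterA_get blocks n _ j (by simpa using hj)]
    simp [hj]
  · have h1 : (pvOuterA blocks n (List.replicate n [])).length ≤ j := by
      rw [pvOuterA_length]; simp; omega
    simp [List.getElem?_eq_none h1, hj]

-- ---- B side ----

-- the peeled transpose also computes the columns, column index by column index
lemma pvPeel_eq_map (n : Nat) (tails : List (List Char)) :
    pvPeel n tails =
      (List.range n).map (fun c => String.ofList (tails.filterMap (fun t => t[c]?))) := by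
  induction n generalizing tails with
  | zero => rfl
  | succ n ih =>
      rw [pvPeel, ih, List.range_succ_eq_map]
      simp only [List.map_cons, List.map_map]
      congr 1
      · congr 1
        apply List.filterMap_congr
        intro t _
        exact List.head?_eq_getElem?
      · apply List.map_congr_left
        intro c _
        simp only [Function.comp_apply]
        congr 1
        rw [List.filterMap_map]
        apply List.filterMap_congr
        intro t _
        simp [List.getElem?_tail]

-- ===== VERDICT (by name: the statement is the Claim_ definition above) =====
theorem blocks_to_baskets_spec : Claim_equal_blocks_to_baskets := by
  intro blocks _ _
  unfold Spec_blocks_to_baskets blocks_to_baskets blocks_to_baskets_alt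
  cases hb : blocks[0]? with
  | none => rfl
  | some b0 =>
      simp only []
      rw [show (fun (baskets : List (List Char)) (c : Nat) =>
            blocks.foldl (fun b element =>
              if c < element.toList.length then
                b.set c (b[c]! ++ [element.toList[c]!]) else b) baskets)
          = fun b c => pvInnerA c blocks b from rfl]
      rw [show ((List.range b0.toList.length).foldl (fun b c => pvInnerA c blocks b)
            (List.replicate b0.toList.length []))
          = pvOuterA blocks b0.toList.length (List.replicate b0.toList.length []) from rfl]
      rw [pvOuterA_eq_map, pvPeel_eq_map, List.map_map]
      apply List.map_congr_left
      intro c _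
      simp only [Function.comp_apply]
      congr 1
      unfold pvCol
      rw [List.filterMap_map]
      rfl
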